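-- pv_equiv track=rewrite | github.com/wit4401/MATH471 | Exam1/exam1Problem2.py | hornersRule
-- ===== SOURCE A (Python) =====
-- def hornersRule(polyvec, val):
--
--     # this empty list will eventually return the result of the algorithms
--     result = []
--
--     # variable holds the polyvec length
--     veclen = len(polyvec)
--
--     p = polyvec[veclen-1]
--
--     # Implement horner's rule in our for loop
--     for i in range(veclen-2,-1,-1):
--         p = val*p + polyvec[i]
--
--     result.append(p)
--
--     dp = (veclen-1)*polyvec[veclen-1]
--
--     # Implement Horner's Rule on the derivative of the polynomial
--     for i in range(veclen-2,0,-1):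
--         dp = dp*val + polyvec[i]*i
--
--     result.append(dp)
--     return result
-- ===== SOURCE B (Python) =====
-- def hornersRule(polyvec, val):
--     # Single-pass combined Horner: derivative by synthetic division.
--     p = polyvec[-1]
--     dp = 0 * polyvec[-1]
--     for i in range(len(polyvec) - 2, -1, -1):
--         dp = dp * val + p
--         p = p * val + polyvec[i]
--     return [p, dp]
-- ===== Notes on version B (the rewrite author's own statement) =====
-- stated objective: alternative
-- what changed: Replaces A's two separate Horner loops (value, then a second Horner pass over index-weighted derivative coefficients) by one fused loop computing value and derivative together via synthetic division (dp = dp*val + p before p = p*val + c).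
import Mathlib
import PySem

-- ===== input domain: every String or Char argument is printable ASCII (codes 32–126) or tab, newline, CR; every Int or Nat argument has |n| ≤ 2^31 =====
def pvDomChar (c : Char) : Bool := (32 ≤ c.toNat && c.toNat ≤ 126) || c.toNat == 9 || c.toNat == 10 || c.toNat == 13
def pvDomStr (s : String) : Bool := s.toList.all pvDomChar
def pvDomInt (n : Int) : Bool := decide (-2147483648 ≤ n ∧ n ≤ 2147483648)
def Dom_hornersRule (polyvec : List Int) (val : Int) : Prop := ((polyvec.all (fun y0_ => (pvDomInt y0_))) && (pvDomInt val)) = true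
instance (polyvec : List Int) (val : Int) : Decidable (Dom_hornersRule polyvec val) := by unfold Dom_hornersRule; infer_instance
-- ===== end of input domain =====

-- B fuses A's two Horner loops into one synthetic-division pass (alternative decomposition, same cost).

-- ===== PORT A =====
-- A: p by Horner over all coefficients, then dp by a second Horner pass over index-weighted coefficients.
-- polyvec[veclen-1] is in range whenever polyvec ≠ [] (Pre_); pyGetD's default 0 is never used then.
def hornersRule (polyvec : List Int) (val : Int) : List Int :=
  let veclen : Int := polyvec.length
  let p0 := PySem.List.pyGetD polyvec (veclen - 1) 0
  let p := (PySem.List.pyRange (veclen - 2) (-1) (-1)).foldl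
             (fun p i => val * p + PySem.List.pyGetD polyvec i 0) p0
  let dp0 := (veclen - 1) * PySem.List.pyGetD polyvec (veclen - 1) 0
  let dp := (PySem.List.pyRange (veclen - 2) 0 (-1)).foldl
              (fun dp i => dp * val + PySem.List.pyGetD polyvec i 0 * i) dp0
  [p, dp]

-- ===== PORT B =====
-- B: one fused loop; dp updated by synthetic division (dp = dp*val + p) before p = p*val + c.
def hornersRule_alt (polyvec : List Int) (val : Int) : List Int :=
  let p0 := PySem.List.pyGetD polyvec (-1) 0
  let dp0 := 0 * PySem.List.pyGetD polyvec (-1) 0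
  let pd := (PySem.List.pyRange ((polyvec.length : Int) - 2) (-1) (-1)).foldl
              (fun (pd : Int × Int) i =>
                (pd.1 * val + PySem.List.pyGetD polyvec i 0, pd.2 * val + pd.1)) (p0, dp0)
  [pd.1, pd.2]

-- ===== PRECONDITION & SPEC =====
-- Pre_ excludes the empty coefficient list, on which Python A raises IndexError at polyvec[veclen-1].
def Pre_hornersRule (polyvec : List Int) (val : Int) : Prop := polyvec ≠ []
instance (polyvec : List Int) (val : Int) : Decidable (Pre_hornersRule polyvec val) := by unfold Pre_hornersRule; infer_instance
def pvWitness_hornersRule : List Int × Int := ([1, 2, 3], 2)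

def Spec_hornersRule (polyvec : List Int) (val : Int) (out : List Int) : Prop := out = hornersRule_alt polyvec val
instance (polyvec : List Int) (val : Int) (out : List Int) : Decidable (Spec_hornersRule polyvec val out) := by unfold Spec_hornersRule; infer_instance

-- ===== CLAIM (what is proved, stated in full; the proofs are below) =====
def Claim_equal_hornersRule : Prop := ∀ (polyvec : List Int) (val : Int), Dom_hornersRule polyvec val → Pre_hornersRule polyvec val → Spec_hornersRule polyvec val (hornersRule polyvec val)

-- ===== LEMMAS AND PROOFS =====

-- descending index list [m-1, m-2, ..., 0]
def pvDesc (m : Nat) : List Int :=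
  match m with
  | 0 => []
  | Nat.succ k => (k : Int) :: pvDesc k

-- descending index list stopping before 0: [m-1, ..., 1]
def pvDesc1 (m : Nat) : List Int :=
  match m with
  | 0 => []
  | 1 => []
  | Nat.succ (Nat.succ k) => ((k + 1 : Nat) : Int) :: pvDesc1 (k + 1)

theorem pvDesc1_length (k : Nat) : (pvDesc1 (k + 1)).length = k := by
  induction k with
  | zero => rfl
  | succ n ih => simp [pvDesc1, ih]

theorem pvRangeA (m : Nat) :
    PySem.List.pyRange ((m : Int) - 1) (-1) (-1) = pvDesc m := by
  induction m with
  | zero =>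
    have h : ((0 : Nat) : Int) - 1 ≤ -1 := by omega
    rw [PySem.List.pyRange_neg_one_eq_nil h]; rfl
  | succ k ih =>
    have h : (-1 : Int) < ((k + 1 : Nat) : Int) - 1 := by push_cast; omega
    rw [PySem.List.pyRange_neg_one_cons h]
    have e1 : ((k + 1 : Nat) : Int) - 1 = (k : Int) := by push_cast; ring
    rw [e1, ih]
    rfl

theorem pvRangeB (m : Nat) :
    PySem.List.pyRange ((m : Int) - 1) 0 (-1) = pvDesc1 m := by
  induction m with
  | zero =>
    have h : ((0 : Nat) : Int) - 1 ≤ 0 := by omega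
    rw [PySem.List.pyRange_neg_one_eq_nil h]; rfl
  | succ k ih =>
    match k, ih with
    | 0, _ =>
      have h : ((1 : Nat) : Int) - 1 ≤ 0 := by omega
      rw [PySem.List.pyRange_neg_one_eq_nil h]; rfl
    | Nat.succ j, ih =>
      have h : (0 : Int) < ((j + 1 + 1 : Nat) : Int) - 1 := by push_cast; omega
      rw [PySem.List.pyRange_neg_one_cons h]
      have e1 : ((j + 1 + 1 : Nat) : Int) - 1 = ((j + 1 : Nat) : Int) := by push_cast; ring
      rw [e1]
      rw [show ((j + 1 : Nat) : Int) = ((Nat.succ j : Nat) : Int) from rfl, ih]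
      rfl

-- A's dp-fold is affine in its start value
theorem pvLinA (xs : List Int) (val : Int) (L : List Int) (s : Int) :
    L.foldl (fun dp i => dp * val + PySem.List.pyGetD xs i 0 * i) s
      = s * val ^ L.length
        + L.foldl (fun dp i => dp * val + PySem.List.pyGetD xs i 0 * i) 0 := by
  induction L generalizing s with
  | nil => simp
  | cons i L ih =>
    simp only [List.foldl_cons, List.length_cons]
    rw [ih (s * val + PySem.List.pyGetD xs i 0 * i),
        ih (0 * val + PySem.List.pyGetD xs i 0 * i)]
    ring

-- B's fused pair-fold: first component is A's value Horner
theorem pvFst (xs : List Int) (val : Int) (L : List Int) (p d : Int) :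
    (L.foldl (fun (pd : Int × Int) i =>
        (pd.1 * val + PySem.List.pyGetD xs i 0, pd.2 * val + pd.1)) (p, d)).1
      = L.foldl (fun p i => val * p + PySem.List.pyGetD xs i 0) p := by
  induction L generalizing p d with
  | nil => rfl
  | cons i L ih =>
    simp only [List.foldl_cons]
    rw [ih, mul_comm]

-- B's fused pair-fold: second component equals A's weighted-coefficient dp-fold
theorem pvSnd (xs : List Int) (val : Int) (m : Nat) (p d : Int) :
    ((pvDesc m).foldl (fun (pd : Int × Int) i =>
        (pd.1 * val + PySem.List.pyGetD xs i 0, pd.2 * val + pd.1)) (p, d)).2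
      = d * val ^ m
        + (pvDesc1 m).foldl (fun dp i => dp * val + PySem.List.pyGetD xs i 0 * i) ((m : Int) * p) := by
  induction m generalizing p d with
  | zero => simp [pvDesc, pvDesc1]
  | succ k ih =>
    match k, ih with
    | 0, _ => simp [pvDesc, pvDesc1]
    | Nat.succ j, ih =>
      rw [show pvDesc (j + 1 + 1) = ((j + 1 : Nat) : Int) :: pvDesc (j + 1) from rfl,
          List.foldl_cons, ih,
          show pvDesc1 (j + 1 + 1) = ((j + 1 : Nat) : Int) :: pvDesc1 (j + 1) from rfl,
          List.foldl_cons]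
      simp only [Nat.succ_eq_add_one]
      conv_lhs => rw [pvLinA xs val (pvDesc1 (j + 1))]
      conv_rhs => rw [pvLinA xs val (pvDesc1 (j + 1))]
      rw [pvDesc1_length]
      push_cast
      ring

-- ===== VERDICT (by name: the statement is the Claim_ definition above) =====
theorem hornersRule_spec : Claim_equal_hornersRule := by
  intro xs val _ hpre
  have hn : 0 < xs.length := by
    cases xs with
    | nil => exact absurd rfl hpre
    | cons a t => simp
  simp only [Spec_hornersRule, hornersRule, hornersRule_alt]
  have ht : ((xs.length : Int) - 1).toNat = xs.length - 1 := by omega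
  have egl : PySem.List.pyGetD xs ((xs.length : Int) - 1) 0 = PySem.List.pyGetD xs (-1) 0 := by
    rw [PySem.List.pyGetD_neg_one xs 0 hpre,
        PySem.List.pyGetD_eq_getElem xs 0 (by omega) (by omega),
        List.getLast_eq_getElem]
    simp [ht]
  have e2 : ((xs.length : Int) - 2) = ((xs.length - 1 : Nat) : Int) - 1 := by omega
  rw [e2, pvRangeA, pvRangeB, egl, pvFst, pvSnd]
  have e1 : ((xs.length : Int) - 1) = ((xs.length - 1 : Nat) : Int) := by omega
  rw [e1]
  simp
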